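-- pv_equiv track=rewrite | github.com/otterchung/Advent-of-Code | AOC2023/Day 14 P2.py | splitByRange
-- ===== SOURCE A (Python) =====
-- def splitByRange(line):
--     line += "#"
--     splitRange = []
--     i = 0
--     prev_i = 0
--     y = line.count("#")
--     for a in range(0, y):
--         i = line.index("#", i) + 1
--         splitRange.append(line[prev_i:i])
--         prev_i = i
--
--     return splitRange
-- ===== SOURCE B (Python) =====
-- import re
--
-- def splitByRange(line):
--     return re.findall(r'[^#]*#', line + "#")
-- ===== Notes on version B (the rewrite author's own statement) =====
-- stated objective: idiomatic
-- what changed: Replaces A's count-then-repeated-index('#')-jump loop with slicing by a single regex scan, re.findall(r'[^#]*#', line + '#'), which emits each maximal non-'#' run together with its terminating '#'.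
import Mathlib
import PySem

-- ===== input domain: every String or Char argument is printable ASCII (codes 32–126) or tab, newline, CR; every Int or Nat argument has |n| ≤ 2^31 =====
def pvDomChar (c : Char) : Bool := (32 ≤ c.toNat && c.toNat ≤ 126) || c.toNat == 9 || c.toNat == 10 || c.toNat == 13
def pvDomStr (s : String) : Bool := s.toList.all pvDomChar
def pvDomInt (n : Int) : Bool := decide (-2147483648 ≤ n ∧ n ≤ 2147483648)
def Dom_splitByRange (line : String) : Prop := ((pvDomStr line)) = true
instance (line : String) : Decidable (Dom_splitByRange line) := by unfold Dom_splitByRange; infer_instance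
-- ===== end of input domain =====

-- B replaces A's count-then-repeated-index-jump loop by a single regex-style scan
-- (re.findall(r'[^#]*#', line + '#')); objective: idiomatic, same return value on every input.

-- ===== PORT A =====
-- literal transliteration of A: append '#', y = line.count('#'),
-- then 'for a in range(0, y): i = line.index('#', i) + 1; append line[prev_i:i]; prev_i = i'
def splitByRange (line : String) : List String :=
  let line2 := line ++ "#"
  let y := PySem.Str.count line2 "#"
  let st := (PySem.List.pyRange 0 (y : Int) 1).foldl
      (fun (st : Int × Int × List String) _ =>
        let i := PySem.Str.findFrom line2 "#" st.1 + 1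
        (i, i, st.2.2 ++ [PySem.Str.slice line2 (some st.2.1) (some i)]))
      (0, 0, [])
  st.2.2

-- ===== PORT B =====
-- the single left-to-right scan the regex engine performs for the pattern [^#]*# :
-- accumulate non-'#' characters, emit the run plus its terminating '#'.
def scanHash : List Char → List Char → List String
  | [], _ => []
  | c :: rest, acc =>
    if c = '#' then String.ofList (acc ++ [c]) :: scanHash rest []
    else scanHash rest (acc ++ [c])

def splitByRange_alt (line : String) : List String :=
  scanHash (line.toList ++ ['#']) []

-- ===== PRECONDITION & SPEC =====
def Spec_splitByRange (line : String) (out : List String) : Prop := out = splitByRange_alt line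
instance (line : String) (out : List String) : Decidable (Spec_splitByRange line out) := by unfold Spec_splitByRange; infer_instance

-- ===== CLAIM (what is proved, stated in full; the proofs are below) =====
def Claim_equal_splitByRange : Prop := ∀ (line : String), Dom_splitByRange line → Spec_splitByRange line (splitByRange line)

-- ===== LEMMAS AND PROOFS =====

-- index (length of the hash-free prefix) of the first '#'
def firstHash (cs : List Char) : Nat := (cs.takeWhile (· ≠ '#')).length

-- A's loop body ignores the range element: the foldl is an iterate of the step.
theorem foldl_const_iterate {α σ : Type} (g : σ → σ) (l : List α) (st : σ) :
    l.foldl (fun s _ => g s) st = g^[l.length] st := by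
  induction l generalizing st with
  | nil => rfl
  | cons x xs ih => simp [List.foldl_cons, ih, Function.iterate_succ_apply]

theorem countgo_hash (fuel : Nat) (cs : List Char) (acc : Nat) (h : cs.length ≤ fuel) :
    PySem.Chars.count.go ['#'] fuel cs acc = acc + cs.count '#' := by
  induction fuel generalizing cs acc with
  | zero =>
    interval_cases h2 : cs.length
    · simp_all [List.length_eq_zero_iff.mp h2, PySem.Chars.count.go]
  | succ n ih =>
    cases cs with
    | nil => simp [PySem.Chars.count.go]
    | cons c t =>
      have ht : t.length ≤ n := by simp at h; omega
      conv_lhs => rw [PySem.Chars.count.go]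
      simp [List.isPrefixOf]
      by_cases hc : c = '#' <;>
        simp [hc, ih t _ ht, eq_comm] <;> omega

theorem count_hash (cs : List Char) : PySem.Chars.count cs ['#'] = cs.count '#' := by
  simp [PySem.Chars.count, countgo_hash cs.length cs 0 le_rfl]

theorem findgo_hash (cs : List Char) (x : Nat) :
    PySem.Chars.find.go ['#'] cs x =
      if '#' ∈ cs then ((x + firstHash cs : Nat) : Int) else -1 := by
  induction cs generalizing x with
  | nil => simp [PySem.Chars.find.go.eq_1]
  | cons c t ih =>
    by_cases hc : c = '#'
    · subst hc
      simp [PySem.Chars.find.go.eq_2, List.isPrefixOf, firstHash]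
    · simp [PySem.Chars.find.go.eq_2, List.isPrefixOf, hc, ih, firstHash,
        List.takeWhile_cons, Ne.symm hc]
      split <;> omega

theorem find_hash (cs : List Char) (h : '#' ∈ cs) :
    PySem.Chars.find cs ['#'] = (firstHash cs : Int) := by
  simp [PySem.Chars.find, findgo_hash, h]

-- scanHash with a pending accumulator, when a '#' is present, emits one segment and restarts
theorem scanHash_emit (cs : List Char) (acc : List Char) (h : '#' ∈ cs) :
    scanHash cs acc =
      String.ofList (acc ++ cs.take (firstHash cs + 1)) :: scanHash (cs.drop (firstHash cs + 1)) [] := by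
  induction cs generalizing acc with
  | nil => cases h
  | cons c t ih =>
    by_cases hc : c = '#'
    · subst hc; simp [scanHash, firstHash]
    · have ht : '#' ∈ t := by cases h with | head => exact absurd rfl hc | tail _ h => exact h
      simp [scanHash, hc, ih _ ht, firstHash]

theorem scanHash_no_hash (cs : List Char) (acc : List Char) (h : '#' ∉ cs) :
    scanHash cs acc = [] := by
  induction cs generalizing acc with
  | nil => rfl
  | cons c t ih =>
    have : ¬ c = '#' := fun e => h (e ▸ List.mem_cons_self)
    simp [scanHash, this, ih _ (fun m => h (List.mem_cons_of_mem _ m))]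

-- the A-side step function on the characters L of line + '#'
def stepA (L : List Char) (st : Int × Int × List String) : Int × Int × List String :=
  let i := PySem.Chars.findFrom L ['#'] st.1 + 1
  (i, i, st.2.2 ++ [String.ofList (PySem.List.slice L (some st.2.1) (some i))])

theorem firstHash_decomp (cs : List Char) (h : '#' ∈ cs) :
    cs.take (firstHash cs + 1) = cs.take (firstHash cs) ++ ['#'] ∧
    (cs.drop (firstHash cs + 1)).count '#' + 1 = cs.count '#' ∧
    firstHash cs < cs.length := by
  induction cs with
  | nil => cases h
  | cons c t ih =>
    by_cases hc : c = '#'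
    · subst hc; simp [firstHash]
    · have ht : '#' ∈ t := by cases h with | head => exact absurd rfl hc | tail _ h => exact h
      obtain ⟨h1, h2, h3⟩ := ih ht
      have hfh : firstHash (c :: t) = firstHash t + 1 := by
        simp [firstHash, hc]
      refine ⟨?_, ?_, ?_⟩
      · rw [hfh]; simp [List.take_succ_cons, h1]
      · rw [hfh]; simpa [List.count_cons, hc] using h2
      · rw [hfh]; simp [List.length_cons]; omega

theorem loop_invariant (L : List Char) (n k : Nat) (acc : List String)
    (hk : k ≤ L.length) (hn : (L.drop k).count '#' = n) :
    ((stepA L)^[n] ((k : Int), (k : Int), acc)).2.2 = acc ++ scanHash (L.drop k) [] := by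
  induction n generalizing k acc with
  | zero =>
    have : '#' ∉ L.drop k := by
      intro m
      have : 0 < (L.drop k).count '#' := List.count_pos_iff.mpr m
      omega
    simp [scanHash_no_hash _ _ this]
  | succ n ih =>
    have hmem : '#' ∈ L.drop k := by
      by_contra m
      simp [List.count_eq_zero_of_not_mem m] at hn
    obtain ⟨hdec1, hdec2, hdec3⟩ := firstHash_decomp _ hmem
    set j := firstHash (L.drop k) with hj
    have hlen : (L.drop k).length = L.length - k := by simp
    have hk' : k + j + 1 ≤ L.length := by omega
    have hfind : PySem.Chars.findFrom L ['#'] (k : Int) = ((k + j : Nat) : Int) := by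
      rw [PySem.Chars.findFrom_natCast L ['#'] k hk, find_hash _ hmem, ← hj]
      simp
    rw [Function.iterate_succ_apply]
    have hstep : stepA L ((k : Int), (k : Int), acc) =
        (((k + j + 1 : Nat) : Int), ((k + j + 1 : Nat) : Int),
          acc ++ [String.ofList ((L.drop k).take (j + 1))]) := by
      simp only [stepA, hfind]
      have hc : ((k + j : Nat) : Int) + 1 = ((k + j + 1 : Nat) : Int) := by push_cast; ring
      rw [hc, PySem.List.slice_natCast]
      have : k + j + 1 - k = j + 1 := by omega
      rw [this]
    have hcnt : (L.drop (k + j + 1)).count '#' = n := by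
      rw [List.drop_drop, ← Nat.add_assoc] at hdec2
      omega
    rw [hstep, ih (k + j + 1) _ hk' hcnt]
    rw [scanHash_emit _ _ hmem, ← hj, List.drop_drop]
    rw [Nat.add_assoc]
    simp

theorem splitByRange_eq (line : String) : splitByRange line = splitByRange_alt line := by
  simp only [splitByRange, splitByRange_alt]
  have hL : (line ++ "#").toList = line.toList ++ ['#'] := by
    simp [String.toList_append]
  have hfold : ∀ (l : List Int) (st : Int × Int × List String),
      l.foldl (fun (st : Int × Int × List String) _ =>
        let i := PySem.Str.findFrom (line ++ "#") "#" st.1 + 1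
        (i, i, st.2.2 ++ [PySem.Str.slice (line ++ "#") (some st.2.1) (some i)])) st =
      (stepA (line.toList ++ ['#']))^[l.length] st := by
    intro l st
    rw [← foldl_const_iterate]
    congr 1
    funext st _
    simp [stepA, PySem.Str.slice, PySem.Str.findFrom, hL]
  rw [hfold]
  have hy : PySem.Str.count (line ++ "#") "#" = (line.toList ++ ['#']).count '#' := by
    simp [PySem.Str.count, hL, count_hash]
  have hlen : (PySem.List.pyRange 0 ((PySem.Str.count (line ++ "#") "#" : Nat) : Int) 1).length
      = PySem.Str.count (line ++ "#") "#" := by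
    rw [PySem.List.length_pyRange_one]; simp
  rw [hlen, hy]
  have := loop_invariant (line.toList ++ ['#']) ((line.toList ++ ['#']).count '#') 0 []
    (by simp) (by simp)
  simpa using this

-- ===== VERDICT (by name: the statement is the Claim_ definition above) =====
theorem splitByRange_spec : Claim_equal_splitByRange := by
  intro line _
  exact splitByRange_eq line
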